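-- pv_equiv track=rewrite | github.com/co-re-study/co-re-study | 47/가사 검색/정민우.py | solution
-- ===== SOURCE A (Python) =====
-- def solution(words, queries):
--     answer = []
--     trie = dict()
--     reverse_trie = dict()
--
--     for word in words:
--         len_key = str(len(word))
--
--         if len_key in trie:
--             trie[len_key][""] += 1
--         else:
--             trie[len_key] = {"": 1}
--
--         if len_key in reverse_trie:
--             reverse_trie[len_key][""] += 1
--         else:
--             reverse_trie[len_key] = {"": 1}
--
--         target = trie[len_key]
--         reverse_target = reverse_trie[len_key]
--
--         for word_idx in range(len(word) - 1):
--             if word[word_idx] in target: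
--                 target[word[word_idx]][""] += 1
--             else:
--                 target[word[word_idx]] = {"": 1}
--
--             reverse_word_idx = len(word) - word_idx - 1
--             if word[reverse_word_idx] in reverse_target:
--                 reverse_target[word[reverse_word_idx]][""] += 1
--             else:
--                 reverse_target[word[reverse_word_idx]] = {"": 1}
--
--             target = target[word[word_idx]]
--             reverse_target = reverse_target[word[reverse_word_idx]]
--
--     for query in queries:
--         if str(len(query)) in trie:
--             if len(query) * "?" == query:
--                 answer.append(trie[str(len(query))][""])
--             else:
--                 if query[0] == "?":
--                     target = reverse_trie[str(len(query))]
--                     for query_idx in range(len(query) - 1, -1, -1):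
--                         if query[query_idx] == "?":
--                             answer.append(target[""])
--                             break
--                         elif query[query_idx] in target:
--                             target = target[query[query_idx]]
--                         else:
--                             answer.append(0)
--                             break
--                 else:
--                     target = trie[str(len(query))]
--                     for query_idx in range(len(query)):
--                         if query[query_idx] == "?":
--                             answer.append(target[""])
--                             break
--                         elif query[query_idx] in target:
--                             target = target[query[query_idx]]
--                         else:
--                             answer.append(0)
--                             break
--         else:
--             answer.append(0)
--
--     return answer
-- ===== SOURCE B (Python) =====
-- def solution(words, queries):
--     # Flat per-length counting tables instead of nested tries:
--     # total[L] = number of words of length L,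
--     # pref[(L, p)] = number of length-L words starting with p (1 <= len(p) <= L-1),
--     # suf[(L, t)]  = number of length-L words ending with t   (1 <= len(t) <= L-1).
--     total = {}
--     pref = {}
--     suf = {}
--     for w in words:
--         L = len(w)
--         total[L] = total.get(L, 0) + 1
--         for d in range(1, L):
--             a = (L, w[:d])
--             pref[a] = pref.get(a, 0) + 1
--             b = (L, w[L - d:])
--             suf[b] = suf.get(b, 0) + 1
--     answer = []
--     for q in queries:
--         L = len(q)
--         n = total.get(L, 0)
--         if n == 0:
--             answer.append(0)
--         elif q == '?' * L:
--             answer.append(n)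
--         elif '?' not in q:
--             answer.append(0)
--         elif q[0] != '?':
--             answer.append(pref.get((L, q[:q.find('?')]), 0))
--         else:
--             tail = q[L - q[::-1].find('?'):]
--             answer.append(n if tail == '' else suf.get((L, tail), 0))
--     return answer
-- ===== Notes on version B (the rewrite author's own statement) =====
-- stated objective: simpler
-- what changed: Replaces A's two hand-built nested count-tries (dict-of-dicts descended character by character per query) with three flat dictionaries (per-length totals, (length, prefix) counts, (length, suffix) counts) built by slicing, so each query is answered by a single dictionary lookup instead of a trie walk.
import Mathlib
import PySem

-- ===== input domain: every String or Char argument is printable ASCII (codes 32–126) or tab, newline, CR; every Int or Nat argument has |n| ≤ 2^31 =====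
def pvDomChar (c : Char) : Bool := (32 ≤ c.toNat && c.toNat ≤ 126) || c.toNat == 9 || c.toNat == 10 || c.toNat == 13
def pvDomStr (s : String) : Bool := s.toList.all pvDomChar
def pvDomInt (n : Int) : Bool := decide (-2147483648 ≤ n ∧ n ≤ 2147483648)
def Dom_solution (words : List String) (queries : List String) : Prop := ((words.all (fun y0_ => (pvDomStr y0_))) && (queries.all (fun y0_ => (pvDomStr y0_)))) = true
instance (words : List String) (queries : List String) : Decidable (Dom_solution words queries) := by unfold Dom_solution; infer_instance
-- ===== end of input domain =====

-- B replaces A's two nested count-tries by three flat dictionaries (per-length totals and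
-- per-(length, fixed prefix/suffix) counts), so a query is answered by a single lookup
-- instead of a character-by-character trie descent.

-- ===== PORT A =====
-- A's trie node is the Python dict {"": count, ch: subnode, …}: count plus an
-- insertion-ordered chain of children.  The chain is encoded inside the same inductive
-- (constructors fnil/fcons) because a nested `List (Char × PTrie)` inductive is not allowed.
inductive PTrie where
  | node : Int → PTrie → PTrie          -- {"": count} plus children chain
  | fnil : PTrie                        -- empty children chain
  | fcons : Char → PTrie → PTrie → PTrie -- one child binding, rest of the chain
deriving DecidableEq

def PTrie.count : PTrie → Int
  | .node c _ => c
  | _ => 0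

def PTrie.children : PTrie → PTrie
  | .node _ ch => ch
  | _ => .fnil

-- `word[i] in target` / `target[word[i]]` on the children chain
def PTrie.find? (x : Char) : PTrie → Option PTrie
  | .fcons c t rest => if c = x then some t else rest.find? x
  | _ => none

-- `target[word[i]] = …` (dict overwrite keeps the position, a new key appends;
-- only ever applied to chains)
def PTrie.setChild (x : Char) (v : PTrie) : PTrie → PTrie
  | .fcons c t rest => if c = x then .fcons c v rest else .fcons c t (PTrie.setChild x v rest)
  | _ => .fcons x v .fnil

-- `if key in d: d[key][""] += 1 else: d[key] = {"": 1}`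
def pvBump : Option PTrie → PTrie
  | some t => .node (t.count + 1) t.children
  | none => .node 1 .fnil

-- A's per-word descent `for word_idx in …: increment/create child; descend`
def pvInsertPath : PTrie → List Char → PTrie
  | t, [] => t
  | t, x :: rest =>
      .node t.count (PTrie.setChild x (pvInsertPath (pvBump (t.children.find? x)) rest) t.children)

-- A's per-query loop: stop at the first '?' (append the node count), at a missing
-- child (append 0); `none` = the loop fell through and Python appends nothing
-- (proved unreachable below).
def pvScan : PTrie → List Char → Option Int
  | _, [] => none
  | t, x :: rest =>
      if x = '?' then some t.count
      else match t.children.find? x with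
        | some t' => pvScan t' rest
        | none => some 0

def solution (words : List String) (queries : List String) : List Int :=
  let tries := words.foldl
    (fun (tr : PySem.Dict String PTrie × PySem.Dict String PTrie) w =>
      let cs := w.toList
      let key := PySem.Int.toStr (cs.length : Int)          -- len_key = str(len(word))
      -- forward trie inserts word[0..len-2]; the reverse trie inserts
      -- word[len-1], …, word[1] (reverse_word_idx = len-1-word_idx), i.e. (cs.drop 1).reverse
      (tr.1.insert key (pvInsertPath (pvBump (tr.1.get? key)) (cs.take (cs.length - 1))),
       tr.2.insert key (pvInsertPath (pvBump (tr.2.get? key)) ((cs.drop 1).reverse))))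
    (PySem.Dict.empty, PySem.Dict.empty)
  queries.foldl
    (fun acc q =>
      let cs := q.toList
      let key := PySem.Int.toStr (cs.length : Int)
      match tries.1.get? key with
      | none => acc ++ [0]
      | some root =>
        if cs = List.replicate cs.length '?' then acc ++ [root.count]   -- len(query)*"?" == query
        else if PySem.List.pyGet? cs 0 = some '?' then                  -- query[0] == "?" (cs ≠ [] here)
          match tries.2.get? key with
          | some rroot =>
            -- the reverse loop reads query[len-1], …, query[0]: scan cs.reverse
            (match pvScan rroot cs.reverse with
             | some v => acc ++ [v]
             | none => acc)
          | none => acc   -- unreachable: both tries always carry exactly the same keys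
        else
          match pvScan root cs with
          | some v => acc ++ [v]
          | none => acc)  -- loop fell through without append (proved unreachable)
    []

-- ===== PORT B =====
-- Source B: total[L], pref[(L, w[:d])], suf[(L, w[L-d:])] for d in range(1, L), then one
-- lookup per query.  Strings are handled on the `List Char` side (String.toList bridge).
def solution_alt (words : List String) (queries : List String) : List Int :=
  let st := words.foldl
    (fun (st : PySem.Dict Int Int × (PySem.Dict (Int × List Char) Int × PySem.Dict (Int × List Char) Int)) w =>
      let cs := w.toList
      let L : Int := (cs.length : Int)
      (st.1.insert L (st.1.getD L 0 + 1),
       (PySem.List.pyRange 1 L 1).foldl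
         (fun (ps : PySem.Dict (Int × List Char) Int × PySem.Dict (Int × List Char) Int) d =>
           (ps.1.insert (L, PySem.List.slice cs none (some d))
              (ps.1.getD (L, PySem.List.slice cs none (some d)) 0 + 1),          -- w[:d]
            ps.2.insert (L, PySem.List.slice cs (some (L - d)) none)
              (ps.2.getD (L, PySem.List.slice cs (some (L - d)) none) 0 + 1)))   -- w[L-d:]
         st.2))
    (PySem.Dict.empty, (PySem.Dict.empty, PySem.Dict.empty))
  queries.foldl
    (fun acc q =>
      let cs := q.toList
      let L : Int := (cs.length : Int)
      let n := st.1.getD L 0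
      acc ++ [
        if n = 0 then 0
        else if cs = List.replicate cs.length '?' then n                 -- q == '?' * L
        else if PySem.Chars.isIn ['?'] cs = false then 0                 -- '?' not in q
        else if ¬ (PySem.List.pyGet? cs 0 = some '?') then               -- q[0] != '?'
          -- q[:q.index('?')]  (single-char needle: str.index = list index, present here)
          st.2.1.getD (L, PySem.List.slice cs none (some (((PySem.List.index? cs '?').getD 0 : Nat) : Int))) 0
        else
          -- tail = q[L - q[::-1].index('?'):]
          let tail := PySem.List.slice cs (some (L - (((PySem.List.index? cs.reverse '?').getD 0 : Nat) : Int))) none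
          if tail = [] then n else st.2.2.getD (L, tail) 0])
    []

-- ===== PRECONDITION & SPEC =====
def Spec_solution (words : List String) (queries : List String) (out : List Int) : Prop := out = solution_alt words queries
instance (words : List String) (queries : List String) (out : List Int) : Decidable (Spec_solution words queries out) := by unfold Spec_solution; infer_instance

-- ===== CLAIM (what is proved, stated in full; the proofs are below) =====
def Claim_equal_solution : Prop := ∀ (words : List String) (queries : List String), Dom_solution words queries → Spec_solution words queries (solution words queries)


-- ===== LEMMAS AND PROOFS =====

def pvLookup : PTrie → List Char → Option PTrie
  | t, [] => some t
  | t, x :: p =>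
    match t.children.find? x with
    | some t' => pvLookup t' p
    | none => none
def pvCnt (t : PTrie) (p : List Char) : Int :=
  match pvLookup t p with
  | some t' => t'.count
  | none => 0
theorem pvCnt_nil (t : PTrie) : pvCnt t [] = t.count := rfl
theorem pvCnt_cons (t : PTrie) (x : Char) (p : List Char) :
    pvCnt t (x :: p) = (match t.children.find? x with
      | some t' => pvCnt t' p
      | none => 0) := by
  cases h : t.children.find? x <;> simp [pvCnt, pvLookup, h]

theorem pvFind?_setChild (t : PTrie) (x y : Char) (v : PTrie) :
    PTrie.find? y (PTrie.setChild x v t) = if y = x then some v else t.find? y := by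
  induction t with
  | fcons c u rest ihu ihr =>
    rcases eq_or_ne c x with hcx | hcx
    · subst hcx
      rcases eq_or_ne y c with hyc | hyc
      · simp [PTrie.setChild, PTrie.find?, hyc]
      · simp [PTrie.setChild, PTrie.find?, hyc, Ne.symm hyc]
    · rcases eq_or_ne c y with hcy | hcy
      · subst hcy
        simp [PTrie.setChild, PTrie.find?, hcx]
      · simp [PTrie.setChild, PTrie.find?, hcx, hcy, ihr]
  | node c ch ih =>
    rcases eq_or_ne y x with hyx | hyx
    · simp [PTrie.setChild, PTrie.find?, hyx]
    · simp [PTrie.setChild, PTrie.find?, hyx, Ne.symm hyx]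
  | fnil =>
    rcases eq_or_ne y x with hyx | hyx
    · simp [PTrie.setChild, PTrie.find?, hyx]
    · simp [PTrie.setChild, PTrie.find?, hyx, Ne.symm hyx]

theorem pvLookup_pvBump_cons (o : Option PTrie) (x : Char) (p : List Char) :
    pvLookup (pvBump o) (x :: p) =
      (match o with | some t => pvLookup t (x :: p) | none => none) := by
  cases o with
  | none => simp [pvBump, pvLookup, PTrie.children, PTrie.find?]
  | some t => cases t <;> simp [pvBump, pvLookup, PTrie.children]

theorem pvCount_pvBump (o : Option PTrie) :
    (pvBump o).count = (match o with | some t => t.count + 1 | none => 1) := by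
  cases o <;> rfl

theorem pvCnt_pvBump_cons (o : Option PTrie) (x : Char) (p : List Char) :
    pvCnt (pvBump o) (x :: p) =
      (match o with | some t => pvCnt t (x :: p) | none => 0) := by
  cases o with
  | none => simp [pvCnt, pvLookup_pvBump_cons]
  | some t => simp [pvCnt, pvLookup_pvBump_cons]

theorem pvCnt_insertPath : ∀ (cs : List Char) (t : PTrie) (p : List Char),
    pvCnt (pvInsertPath t cs) p = pvCnt t p + (if p ≠ [] ∧ p <+: cs then 1 else 0) := by
  intro cs
  induction cs with
  | nil =>
    intro t p
    have : ¬ (p ≠ [] ∧ p <+: ([] : List Char)) := by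
      rintro ⟨hne, hpre⟩; exact hne (List.prefix_nil.mp hpre)
    simp [pvInsertPath]
  | cons x cs' ih =>
    intro t p
    cases p with
    | nil => simp [pvCnt_nil, pvInsertPath, PTrie.count]
    | cons y p' =>
      rw [pvCnt_cons, pvCnt_cons]
      have hch : (pvInsertPath t (x :: cs')).children
          = PTrie.setChild x (pvInsertPath (pvBump (t.children.find? x)) cs') t.children := rfl
      rw [hch, pvFind?_setChild]
      rcases eq_or_ne y x with hyx | hyx
      · subst hyx
        simp only [if_true]
        rw [ih]
        cases p' with
        | nil =>
          have : ([y] : List Char) <+: y :: cs' := by simp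
          cases hu : t.children.find? y with
          | none => simp [pvCnt_nil, pvCount_pvBump, this]
          | some u => simp [pvCnt_nil, pvCount_pvBump, this]
        | cons z p'' =>
          have hiff : (y :: z :: p'' <+: y :: cs') ↔ (z :: p'' <+: cs') := by
            simp [List.cons_prefix_cons]
          cases hu : t.children.find? y with
          | none =>
            simp only [pvCnt_pvBump_cons]
            by_cases hpre : z :: p'' <+: cs' <;> simp [hpre, hiff]
          | some u =>
            simp only [pvCnt_pvBump_cons]
            by_cases hpre : z :: p'' <+: cs' <;> simp [hpre, hiff]
      · have : ¬ (y :: p' <+: x :: cs') := by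
          intro hpre
          exact hyx (List.cons_prefix_cons.mp hpre).1
        simp [hyx, this]

theorem pvLookup_insertPath_none : ∀ (cs : List Char) (t : PTrie) (p : List Char),
    pvLookup t p = none → ¬ p <+: cs → pvLookup (pvInsertPath t cs) p = none := by
  intro cs
  induction cs with
  | nil => intro t p h _; simpa [pvInsertPath] using h
  | cons x cs' ih =>
    intro t p h hpre
    cases p with
    | nil => simp [pvLookup] at h
    | cons y p' =>
      have hch : (pvInsertPath t (x :: cs')).children
          = PTrie.setChild x (pvInsertPath (pvBump (t.children.find? x)) cs') t.children := rfl
      rw [pvLookup] at h ⊢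
      rw [hch, pvFind?_setChild]
      rcases eq_or_ne y x with hyx | hyx
      · subst hyx
        simp only [if_true]
        have hp' : ¬ p' <+: cs' := by
          intro hp; exact hpre (List.cons_prefix_cons.mpr ⟨rfl, hp⟩)
        cases hu : t.children.find? y with
        | none =>
          cases p' with
          | nil => exact absurd (List.nil_prefix) hp'
          | cons z p'' =>
            have : pvLookup (pvBump none) (z :: p'') = none := by
              simp [pvLookup_pvBump_cons]
            exact ih _ _ this hp'
        | some u =>
          rw [hu] at h
          have : pvLookup (pvBump (some u)) p' = none := by
            cases p' with
            | nil => simp [pvLookup] at h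
            | cons z p'' => rw [pvLookup_pvBump_cons]; simpa [pvLookup, hu] using h
          exact ih _ _ this hp'
      · simp only [if_neg hyx]
        cases hu : t.children.find? y with
        | none => rfl
        | some u => rw [hu] at h; exact h

theorem pvScan_no_q : ∀ (rest : List Char) (t : PTrie), rest ≠ [] → '?' ∉ rest →
    (∀ p : List Char, p ≠ [] → rest.length ≤ p.length → pvLookup t p = none) →
    pvScan t rest = some 0 := by
  intro rest
  induction rest with
  | nil => intro t h; exact absurd rfl h
  | cons x rest' ih =>
    intro t _ hq hlk
    have hx : ¬ x = '?' := by simp at hq; exact fun h => hq.1 h.symm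
    rw [pvScan]
    rw [if_neg hx]
    cases rest' with
    | nil =>
      have : pvLookup t [x] = none := hlk [x] (by simp) (by simp)
      rw [pvLookup] at this
      cases hu : t.children.find? x with
      | none => rfl
      | some u => rw [hu] at this; simp [pvLookup] at this
    | cons z rest'' =>
      cases hu : t.children.find? x with
      | none => rfl
      | some u =>
        refine ih u (by simp) (by simp_all) ?_
        intro p hp hlen
        have := hlk (x :: p) (by simp) (by simpa using Nat.succ_le_succ hlen)
        rw [pvLookup, hu] at this
        exact this

theorem pvScan_q : ∀ (a : List Char) (t : PTrie) (b : List Char), '?' ∉ a →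
    pvScan t (a ++ '?' :: b) = some (pvCnt t a) := by
  intro a
  induction a with
  | nil => intro t b _; simp [pvScan, pvCnt_nil]
  | cons x a' ih =>
    intro t b hq
    have hx : ¬ x = '?' := by simp at hq; exact fun h => hq.1 h.symm
    rw [List.cons_append, pvScan, if_neg hx, pvCnt_cons]
    cases hu : t.children.find? x with
    | none => rfl
    | some u => exact ih u b (by simp_all)
def pvGood (L : Nat) (ws : List (List Char)) (t : PTrie) : Prop :=
  t.count = (ws.length : Int) ∧
  (∀ p : List Char, p ≠ [] → p.length < L →
      pvCnt t p = (ws.countP (fun w => decide (p <+: w)) : Int)) ∧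
  (∀ p : List Char, p ≠ [] → L ≤ p.length → pvLookup t p = none)

theorem pvCnt_pvBump_ne_nil (o : Option PTrie) (p : List Char) (hp : p ≠ []) :
    pvCnt (pvBump o) p = (match o with | some t => pvCnt t p | none => 0) := by
  cases p with
  | nil => exact absurd rfl hp
  | cons x p' => exact pvCnt_pvBump_cons o x p'

theorem pvGood_step (L : Nat) (ws : List (List Char)) (o : Option PTrie) (v : List Char)
    (h : match o with | none => ws = [] | some t => pvGood L ws t) (hv : v.length = L) :
    pvGood L (ws ++ [v]) (pvInsertPath (pvBump o) (v.take (v.length - 1))) := by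
  refine ⟨?_, ?_, ?_⟩
  · -- the root count
    have h1 : pvCnt (pvInsertPath (pvBump o) (v.take (v.length - 1))) [] = (pvBump o).count := by
      rw [pvCnt_insertPath]; simp [pvCnt_nil]
    rw [← pvCnt_nil, h1, pvCount_pvBump]
    cases o with
    | none => simp [h]
    | some t =>
      have hred : (match (some t : Option PTrie) with | some t => t.count + 1 | none => 1)
          = t.count + 1 := rfl
      rw [hred, h.1]; simp
  · intro p hp hpl
    rw [pvCnt_insertPath, pvCnt_pvBump_ne_nil o p hp]
    have hpre : p <+: v.take (v.length - 1) ↔ p <+: v := by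
      rw [List.prefix_take_iff]
      constructor
      · exact fun h => h.1
      · intro h; exact ⟨h, by omega⟩
    have hcount : ((ws ++ [v]).countP (fun w => decide (p <+: w)) : Int)
        = (ws.countP (fun w => decide (p <+: w)) : Int) + (if p <+: v then 1 else 0) := by
      rw [List.countP_append]
      by_cases hpv : p <+: v <;> simp [hpv]
    rw [hcount]
    cases o with
    | none =>
      subst h
      by_cases hpv : p <+: v <;> simp [hp, hpre, hpv]
    | some t =>
      have hred : (match (some t : Option PTrie) with | some t => pvCnt t p | none => 0)
          = pvCnt t p := rfl
      rw [hred, h.2.1 p hp hpl]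
      by_cases hpv : p <+: v <;> simp [hp, hpre, hpv]
  · intro p hp hpl
    have hnp : ¬ p <+: v.take (v.length - 1) := by
      intro hpre
      have h2 := hpre.length_le
      rw [List.length_take] at h2
      have hp0 := List.length_pos_of_ne_nil hp
      omega
    refine pvLookup_insertPath_none _ _ _ ?_ hnp
    cases p with
    | nil => exact absurd rfl hp
    | cons x p' =>
      rw [pvLookup_pvBump_cons]
      cases o with
      | none => rfl
      | some t => exact h.2.2 (x :: p') hp hpl

-- str(len) keys: injectivity of decimal printing
theorem pvDigitChar_inj : ∀ a b : Fin 10, Nat.digitChar a = Nat.digitChar b → a = b := by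
  decide

theorem pvToDigits10_inj : ∀ m n : Nat, Nat.toDigits 10 m = Nat.toDigits 10 n → m = n := by
  intro m
  induction m using Nat.strong_induction_on with
  | _ m ih =>
    intro n h
    by_cases hm : m < 10 <;> by_cases hn : n < 10
    · rw [Nat.toDigits_of_lt_base hm, Nat.toDigits_of_lt_base hn] at h
      have := pvDigitChar_inj ⟨m, hm⟩ ⟨n, hn⟩ (by simpa using h)
      simpa using congrArg Fin.val this
    · exfalso
      rw [Nat.toDigits_of_lt_base hm, Nat.toDigits_of_base_le (by norm_num) (by omega)] at h
      have hlen := congrArg List.length h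
      simp only [List.length_append, List.length_cons, List.length_nil] at hlen
      have h1 := @Nat.length_toDigits_pos 10 (n / 10)
      omega
    · exfalso
      rw [Nat.toDigits_of_lt_base hn, Nat.toDigits_of_base_le (by norm_num) (by omega)] at h
      have hlen := congrArg List.length h
      simp only [List.length_append, List.length_cons, List.length_nil] at hlen
      have h1 := @Nat.length_toDigits_pos 10 (m / 10)
      omega
    · rw [Nat.toDigits_of_base_le (n := m) (by norm_num) (by omega),
          Nat.toDigits_of_base_le (n := n) (by norm_num) (by omega)] at h
      have hlast : (m % 10).digitChar = (n % 10).digitChar := by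
        have := congrArg List.getLast? h
        simpa using this
      have hinit : Nat.toDigits 10 (m / 10) = Nat.toDigits 10 (n / 10) := by
        have := congrArg List.dropLast h
        simpa using this
      have hmod : m % 10 = n % 10 := by
        have := pvDigitChar_inj ⟨m % 10, by omega⟩ ⟨n % 10, by omega⟩ (by simpa using hlast)
        simpa using congrArg Fin.val this
      have hdiv : m / 10 = n / 10 := ih (m / 10) (by omega) (n / 10) hinit
      omega

theorem pvToStr_nat_inj {m n : Nat} (h : PySem.Int.toStr (m : Int) = PySem.Int.toStr (n : Int)) :
    m = n := by
  have h2 : PySem.Int.toChars (m : Int) = PySem.Int.toChars (n : Int) := by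
    rw [← PySem.Int.toList_toStr, ← PySem.Int.toList_toStr, h]
  unfold PySem.Int.toChars at h2
  simp at h2
  exact pvToDigits10_inj m n h2
def pvStepT (d : PySem.Dict String PTrie) (v : List Char) : PySem.Dict String PTrie :=
  d.insert (PySem.Int.toStr (v.length : Int))
    (pvInsertPath (pvBump (d.get? (PySem.Int.toStr (v.length : Int)))) (v.take (v.length - 1)))

def pvInv (vs : List (List Char)) (d : PySem.Dict String PTrie) : Prop :=
  ∀ L : Nat,
    match d.get? (PySem.Int.toStr (L : Int)) with
    | none => vs.countP (fun v => decide (v.length = L)) = 0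
    | some t => pvGood L (vs.filter (fun v => decide (v.length = L))) t ∧
        vs.countP (fun v => decide (v.length = L)) ≠ 0

theorem pvInv_nil : pvInv [] PySem.Dict.empty := by
  intro L
  rw [PySem.Dict.get?_empty]
  simp

theorem pvInv_step (vs : List (List Char)) (d : PySem.Dict String PTrie) (v : List Char)
    (h : pvInv vs d) : pvInv (vs ++ [v]) (pvStepT d v) := by
  intro L
  by_cases hL : v.length = L
  · subst hL
    rw [pvStepT, PySem.Dict.get?_insert_self]
    constructor
    · rw [List.filter_append]
      simp only [List.filter_cons, List.filter_nil, decide_eq_true_eq, if_true]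
      refine pvGood_step _ _ _ _ ?_ rfl
      have hinv := h v.length
      cases hd : d.get? (PySem.Int.toStr (v.length : Int)) with
      | none =>
        rw [hd] at hinv
        have : vs.filter (fun w => decide (w.length = v.length)) = [] := by
          rw [List.filter_eq_nil_iff]
          intro a ha
          have h0 : vs.countP (fun w => decide (w.length = v.length)) = 0 := by simpa using hinv
          have := List.countP_eq_zero.mp h0 a ha
          simpa using this
        simp [this]
      | some t =>
        rw [hd] at hinv
        exact hinv.1
    · rw [List.countP_append]
      simp
  · have hne : PySem.Int.toStr (L : Int) ≠ PySem.Int.toStr (v.length : Int) := by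
      intro hkey
      exact hL (pvToStr_nat_inj hkey).symm
    rw [pvStepT, PySem.Dict.get?_insert_of_ne _ _ hne]
    have hinv := h L
    have hcount : (vs ++ [v]).countP (fun w => decide (w.length = L))
        = vs.countP (fun w => decide (w.length = L)) := by
      rw [List.countP_append]
      simp [hL]
    have hfilter : (vs ++ [v]).filter (fun w => decide (w.length = L))
        = vs.filter (fun w => decide (w.length = L)) := by
      rw [List.filter_append]
      simp [hL]
    cases hd : d.get? (PySem.Int.toStr (L : Int)) with
    | none => rw [hd] at hinv; rw [hcount]; exact hinv
    | some t => rw [hd] at hinv; rw [hcount, hfilter]; exact hinv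

theorem pvInv_foldl : ∀ (l vs : List (List Char)) (d : PySem.Dict String PTrie),
    pvInv vs d → pvInv (vs ++ l) (l.foldl pvStepT d) := by
  intro l
  induction l with
  | nil => intro vs d h; simpa using h
  | cons v l' ih =>
    intro vs d h
    have := ih (vs ++ [v]) (pvStepT d v) (pvInv_step vs d v h)
    simpa using this
theorem pvGetD_incfold {κ : Type} [BEq κ] [LawfulBEq κ] [DecidableEq κ] :
    ∀ (l : List κ) (d : PySem.Dict κ Int) (x : κ),
      (l.foldl (fun d k => d.insert k (d.getD k 0 + 1)) d).getD x 0
        = d.getD x 0 + (l.count x : Int) := by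
  intro l
  induction l with
  | nil => intro d x; simp
  | cons k l' ih =>
    intro d x
    rw [List.foldl_cons, ih, PySem.Dict.getD_insert]
    rcases eq_or_ne x k with hxk | hxk
    · subst hxk
      rw [if_pos rfl]
      simp
      ring
    · rw [if_neg hxk]
      simp [Ne.symm hxk]

theorem pvGetD_incfold2 {α κ : Type} [BEq κ] [LawfulBEq κ] [DecidableEq κ] :
    ∀ (l : List α) (ks : α → List κ) (d : PySem.Dict κ Int) (x : κ),
      (l.foldl (fun d a => (ks a).foldl (fun d k => d.insert k (d.getD k 0 + 1)) d) d).getD x 0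
        = d.getD x 0 + ((l.map (fun a => ((ks a).count x : Int))).sum) := by
  intro l
  induction l with
  | nil => intro ks d x; simp
  | cons a l' ih =>
    intro ks d x
    rw [List.foldl_cons, ih, pvGetD_incfold]
    simp
    ring

def pvPrefKeys (cs : List Char) : List (Int × List Char) :=
  (PySem.List.pyRange 1 (cs.length : Int) 1).map
    (fun d => ((cs.length : Int), PySem.List.slice cs none (some d)))

def pvSufKeys (cs : List Char) : List (Int × List Char) :=
  (PySem.List.pyRange 1 (cs.length : Int) 1).map
    (fun d => ((cs.length : Int), PySem.List.slice cs (some ((cs.length : Int) - d)) none))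

theorem pvCount_keys_aux (c : Int) (l : List Int) (hl : l.Nodup) (f : Int → List Char)
    (p : List Char) (hiff : ∀ d ∈ l, f d = p ↔ d = (p.length : Int)) :
    (l.map (fun d => (c, f d))).count (c, p) = if (p.length : Int) ∈ l then 1 else 0 := by
  induction l with
  | nil => simp
  | cons d l' ih =>
    have hfd := hiff d (by simp)
    have hiff' : ∀ d ∈ l', f d = p ↔ d = (p.length : Int) :=
      fun d hd => hiff d (List.mem_cons_of_mem _ hd)
    simp only [List.map_cons, List.count_cons, List.nodup_cons, List.mem_cons] at *
    rw [ih hl.2 hiff']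
    rcases eq_or_ne d ((p.length : Int)) with hd | hd
    · subst hd
      simp [hfd.mpr rfl, hl.1]
    · have hne : ¬ f d = p := fun h => hd (hfd.mp h)
      simp [hne, Ne.symm hd]

theorem pvCount_prefKeys (cs p : List Char) (L : Nat) (hp : p ≠ []) (hpl : p.length < L) :
    (pvPrefKeys cs).count ((L : Int), p) = if cs.length = L ∧ p <+: cs then 1 else 0 := by
  rcases eq_or_ne cs.length L with hL | hL
  · subst hL
    by_cases hpre : p <+: cs
    · have hkey : ∀ d ∈ PySem.List.pyRange 1 (cs.length : Int) 1,
          PySem.List.slice cs none (some d) = p ↔ d = (p.length : Int) := by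
        intro d hd
        rw [PySem.List.mem_pyRange_one] at hd
        rw [PySem.List.slice_to cs (by omega)]
        constructor
        · intro htake
          have hlen := congrArg List.length htake
          rw [List.length_take] at hlen
          omega
        · intro hdl
          subst hdl
          exact (List.prefix_iff_eq_take.mp hpre).symm
      have := pvCount_keys_aux ((cs.length : Int)) (PySem.List.pyRange 1 (cs.length : Int) 1)
        (PySem.List.nodup_pyRange_one 1 (cs.length : Int))
        (fun d => PySem.List.slice cs none (some d)) p hkey
      rw [pvPrefKeys, this]
      simp only [PySem.List.mem_pyRange_one]
      have hp0 := List.length_pos_of_ne_nil hp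
      simp [hpre]
      omega
    · rw [List.count_eq_zero.mpr, if_neg (by tauto)]
      intro hmem
      rw [pvPrefKeys, List.mem_map] at hmem
      obtain ⟨d, hd, heq⟩ := hmem
      rw [PySem.List.mem_pyRange_one] at hd
      have h2 : PySem.List.slice cs none (some d) = p := congrArg Prod.snd heq
      rw [PySem.List.slice_to cs (by omega)] at h2
      exact hpre (h2 ▸ List.take_prefix d.toNat cs)
  · rw [List.count_eq_zero.mpr, if_neg (by tauto)]
    intro hmem
    rw [pvPrefKeys, List.mem_map] at hmem
    obtain ⟨d, hd, heq⟩ := hmem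
    have h1 : (cs.length : Int) = (L : Int) := congrArg Prod.fst heq
    exact hL (by exact_mod_cast h1)

theorem pvCount_sufKeys (cs t : List Char) (L : Nat) (ht : t ≠ []) (htl : t.length < L) :
    (pvSufKeys cs).count ((L : Int), t) = if cs.length = L ∧ t <:+ cs then 1 else 0 := by
  rcases eq_or_ne cs.length L with hL | hL
  · subst hL
    by_cases hsuf : t <:+ cs
    · have hkey : ∀ d ∈ PySem.List.pyRange 1 (cs.length : Int) 1,
          PySem.List.slice cs (some ((cs.length : Int) - d)) none = t ↔ d = (t.length : Int) := by
        intro d hd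
        rw [PySem.List.mem_pyRange_one] at hd
        rw [PySem.List.slice_from cs (by omega)]
        constructor
        · intro hdrop
          have hlen := congrArg List.length hdrop
          rw [List.length_drop] at hlen
          omega
        · intro hdl
          subst hdl
          rw [show ((cs.length : Int) - (t.length : Int)).toNat = cs.length - t.length by omega]
          exact (List.suffix_iff_eq_drop.mp hsuf).symm
      have := pvCount_keys_aux ((cs.length : Int)) (PySem.List.pyRange 1 (cs.length : Int) 1)
        (PySem.List.nodup_pyRange_one 1 (cs.length : Int))
        (fun d => PySem.List.slice cs (some ((cs.length : Int) - d)) none) t hkey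
      rw [pvSufKeys, this]
      simp only [PySem.List.mem_pyRange_one]
      have ht0 := List.length_pos_of_ne_nil ht
      simp [hsuf]
      omega
    · rw [List.count_eq_zero.mpr, if_neg (by tauto)]
      intro hmem
      rw [pvSufKeys, List.mem_map] at hmem
      obtain ⟨d, hd, heq⟩ := hmem
      rw [PySem.List.mem_pyRange_one] at hd
      have h2 : PySem.List.slice cs (some ((cs.length : Int) - d)) none = t := congrArg Prod.snd heq
      rw [PySem.List.slice_from cs (by omega)] at h2
      exact hsuf (h2 ▸ List.drop_suffix _ cs)
  · rw [List.count_eq_zero.mpr, if_neg (by tauto)]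
    intro hmem
    rw [pvSufKeys, List.mem_map] at hmem
    obtain ⟨d, hd, heq⟩ := hmem
    have h1 : (cs.length : Int) = (L : Int) := congrArg Prod.fst heq
    exact hL (by exact_mod_cast h1)
theorem pvFoldl_congr {α β : Type} (f g : β → α → β) (h : ∀ acc x, f acc x = g acc x)
    (l : List α) (init : β) : l.foldl f init = l.foldl g init := by
  have : f = g := funext fun a => funext fun b => h a b
  rw [this]

theorem pvTriesEq (words : List String) :
    words.foldl
      (fun (tr : PySem.Dict String PTrie × PySem.Dict String PTrie) w =>
        (tr.1.insert (PySem.Int.toStr (w.toList.length : Int))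
           (pvInsertPath (pvBump (tr.1.get? (PySem.Int.toStr (w.toList.length : Int))))
             (w.toList.take (w.toList.length - 1))),
         tr.2.insert (PySem.Int.toStr (w.toList.length : Int))
           (pvInsertPath (pvBump (tr.2.get? (PySem.Int.toStr (w.toList.length : Int))))
             ((w.toList.drop 1).reverse))))
      (PySem.Dict.empty, PySem.Dict.empty)
    = ((words.map (fun w => w.toList)).foldl pvStepT PySem.Dict.empty,
       (words.map (fun w => w.toList.reverse)).foldl pvStepT PySem.Dict.empty) := by
  suffices h : ∀ (d1 d2 : PySem.Dict String PTrie),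
      words.foldl _ (d1, d2)
        = ((words.map (fun w => w.toList)).foldl pvStepT d1,
           (words.map (fun w => w.toList.reverse)).foldl pvStepT d2) from h _ _
  induction words with
  | nil => intro d1 d2; rfl
  | cons w l ih =>
    intro d1 d2
    rw [List.foldl_cons]
    rw [show ((d1, d2).1.insert (PySem.Int.toStr (w.toList.length : Int))
           (pvInsertPath (pvBump ((d1, d2).1.get? (PySem.Int.toStr (w.toList.length : Int))))
             (w.toList.take (w.toList.length - 1))),
         (d1, d2).2.insert (PySem.Int.toStr (w.toList.length : Int))
           (pvInsertPath (pvBump ((d1, d2).2.get? (PySem.Int.toStr (w.toList.length : Int))))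
             ((w.toList.drop 1).reverse)))
        = (pvStepT d1 w.toList, pvStepT d2 w.toList.reverse) from by
      rw [pvStepT, pvStepT, List.length_reverse, List.reverse_drop]]
    rw [ih, List.map_cons, List.map_cons, List.foldl_cons, List.foldl_cons]

theorem pvStEq (words : List String) :
    words.foldl
      (fun (st : PySem.Dict Int Int ×
            (PySem.Dict (Int × List Char) Int × PySem.Dict (Int × List Char) Int)) w =>
        (st.1.insert ((w.toList.length : Int)) (st.1.getD ((w.toList.length : Int)) 0 + 1),
         (PySem.List.pyRange 1 ((w.toList.length : Int)) 1).foldl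
           (fun ps d =>
             (ps.1.insert ((w.toList.length : Int), PySem.List.slice w.toList none (some d))
                (ps.1.getD ((w.toList.length : Int), PySem.List.slice w.toList none (some d)) 0 + 1),
              ps.2.insert ((w.toList.length : Int), PySem.List.slice w.toList (some ((w.toList.length : Int) - d)) none)
                (ps.2.getD ((w.toList.length : Int), PySem.List.slice w.toList (some ((w.toList.length : Int) - d)) none) 0 + 1)))
           st.2))
      (PySem.Dict.empty, (PySem.Dict.empty, PySem.Dict.empty))
    = (words.foldl (fun d w => d.insert ((w.toList.length : Int)) (d.getD ((w.toList.length : Int)) 0 + 1)) PySem.Dict.empty,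
       (words.foldl (fun d w => (pvPrefKeys w.toList).foldl (fun d k => d.insert k (d.getD k 0 + 1)) d) PySem.Dict.empty,
        words.foldl (fun d w => (pvSufKeys w.toList).foldl (fun d k => d.insert k (d.getD k 0 + 1)) d) PySem.Dict.empty)) := by
  suffices h : ∀ (d1 : PySem.Dict Int Int) (d2 d3 : PySem.Dict (Int × List Char) Int),
      words.foldl _ (d1, (d2, d3))
        = (words.foldl (fun (d : PySem.Dict Int Int) (w : String) =>
              d.insert ((w.toList.length : Int)) (d.getD ((w.toList.length : Int)) 0 + 1)) d1,
           (words.foldl (fun (d : PySem.Dict (Int × List Char) Int) (w : String) =>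
                (pvPrefKeys w.toList).foldl (fun d k => d.insert k (d.getD k 0 + 1)) d) d2,
            words.foldl (fun (d : PySem.Dict (Int × List Char) Int) (w : String) =>
                (pvSufKeys w.toList).foldl (fun d k => d.insert k (d.getD k 0 + 1)) d) d3)) from
    h _ _ _
  induction words with
  | nil => intro d1 d2 d3; rfl
  | cons w l ih =>
    intro d1 d2 d3
    rw [List.foldl_cons, List.foldl_cons, List.foldl_cons, List.foldl_cons]
    rw [show (PySem.List.pyRange 1 ((w.toList.length : Int)) 1).foldl
        (fun (ps : PySem.Dict (Int × List Char) Int × PySem.Dict (Int × List Char) Int) d =>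
          (ps.1.insert ((w.toList.length : Int), PySem.List.slice w.toList none (some d))
             (ps.1.getD ((w.toList.length : Int), PySem.List.slice w.toList none (some d)) 0 + 1),
           ps.2.insert ((w.toList.length : Int), PySem.List.slice w.toList (some ((w.toList.length : Int) - d)) none)
             (ps.2.getD ((w.toList.length : Int), PySem.List.slice w.toList (some ((w.toList.length : Int) - d)) none) 0 + 1)))
        (d2, d3)
      = ((pvPrefKeys w.toList).foldl
            (fun (d : PySem.Dict (Int × List Char) Int) (k : Int × List Char) => d.insert k (d.getD k 0 + 1)) d2,
         (pvSufKeys w.toList).foldl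
            (fun (d : PySem.Dict (Int × List Char) Int) (k : Int × List Char) => d.insert k (d.getD k 0 + 1)) d3) from ?_]
    · exact ih _ _ _
    · rw [PySem.List.foldl_prod_mk
        (fun (p : PySem.Dict (Int × List Char) Int) (d : Int) =>
          p.insert ((w.toList.length : Int), PySem.List.slice w.toList none (some d))
            (p.getD ((w.toList.length : Int), PySem.List.slice w.toList none (some d)) 0 + 1))
        (fun (p : PySem.Dict (Int × List Char) Int) (d : Int) =>
          p.insert ((w.toList.length : Int), PySem.List.slice w.toList (some ((w.toList.length : Int) - d)) none)
            (p.getD ((w.toList.length : Int), PySem.List.slice w.toList (some ((w.toList.length : Int) - d)) none) 0 + 1))]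
      rw [pvPrefKeys, pvSufKeys, List.foldl_map, List.foldl_map]
theorem pvIsIn_singleton (c : Char) (l : List Char) :
    PySem.Chars.isIn [c] l = true ↔ c ∈ l := by
  rw [PySem.Chars.isIn_iff_infix]
  constructor
  · intro h
    exact List.singleton_sublist.mp h.sublist
  · intro h
    obtain ⟨s, t, rfl⟩ := List.append_of_mem h
    exact ⟨s, t, by simp⟩

theorem pvWs_countP (words : List String) (L : Nat) (p : List Char) :
    ((words.map (fun w => w.toList)).filter (fun v => decide (v.length = L))).countP
        (fun w => decide (p <+: w))
      = words.countP (fun w => decide (w.toList.length = L ∧ p <+: w.toList)) := by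
  rw [List.countP_filter, List.countP_map]
  apply List.countP_congr
  intro w _
  by_cases h1 : w.toList.length = L <;> by_cases h2 : p <+: w.toList <;> simp [h1, h2]

theorem pvWsR_countP (words : List String) (L : Nat) (a : List Char) :
    ((words.map (fun w => w.toList.reverse)).filter (fun v => decide (v.length = L))).countP
        (fun w => decide (a <+: w))
      = words.countP (fun w => decide (w.toList.length = L ∧ a.reverse <:+ w.toList)) := by
  rw [List.countP_filter, List.countP_map]
  apply List.countP_congr
  intro w _
  have hiff : a <+: w.toList.reverse ↔ a.reverse <:+ w.toList := by
    conv_lhs => rw [← List.reverse_reverse a]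
    exact List.reverse_prefix
  by_cases h1 : w.toList.length = L <;> by_cases h2 : a.reverse <:+ w.toList <;>
    simp [h1, h2, hiff]


theorem pvMain (words queries : List String) : solution words queries = solution_alt words queries := by
  simp only [solution, solution_alt, pvTriesEq, pvStEq]
  set T := (words.map (fun w => w.toList)).foldl pvStepT PySem.Dict.empty with hTdef
  set R := (words.map (fun w => w.toList.reverse)).foldl pvStepT PySem.Dict.empty with hRdef
  set TO := List.foldl (fun (d : PySem.Dict Int Int) (w : String) =>
      d.insert ((w.toList.length : Int)) (d.getD ((w.toList.length : Int)) 0 + 1))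
      PySem.Dict.empty words with hTOdef
  set P := List.foldl (fun (d : PySem.Dict (Int × List Char) Int) (w : String) =>
      List.foldl (fun d k => d.insert k (d.getD k 0 + 1)) d (pvPrefKeys w.toList))
      PySem.Dict.empty words with hPdef
  set S := List.foldl (fun (d : PySem.Dict (Int × List Char) Int) (w : String) =>
      List.foldl (fun d k => d.insert k (d.getD k 0 + 1)) d (pvSufKeys w.toList))
      PySem.Dict.empty words with hSdef
  -- invariants of the five dictionaries
  have hT : pvInv (words.map (fun w => w.toList)) T := by
    rw [hTdef]
    have := pvInv_foldl (words.map (fun w => w.toList)) [] PySem.Dict.empty pvInv_nil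
    simpa using this
  have hR : pvInv (words.map (fun w => w.toList.reverse)) R := by
    rw [hRdef]
    have := pvInv_foldl (words.map (fun w => w.toList.reverse)) [] PySem.Dict.empty pvInv_nil
    simpa using this
  have hTO : ∀ L : Nat, TO.getD ((L : Int)) 0
      = (words.countP (fun w => decide (w.toList.length = L)) : Int) := by
    intro L
    have hmapfold : TO = List.foldl
        (fun (d : PySem.Dict Int Int) (k : Int) => d.insert k (d.getD k 0 + 1))
        PySem.Dict.empty (words.map (fun w : String => ((w.toList.length : Int)))) := by
      rw [hTOdef, List.foldl_map]
    rw [hmapfold, pvGetD_incfold, PySem.Dict.getD_empty]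
    rw [List.count_eq_countP, List.countP_map]
    have : words.countP ((fun x => x == (L : Int)) ∘ fun w => ((w.toList.length : Int)))
        = words.countP (fun w => decide (w.toList.length = L)) := by
      apply List.countP_congr
      intro w _
      by_cases h : w.toList.length = L <;> simp_all
    rw [this]
    simp
  have hP : ∀ (L : Nat) (p : List Char), p ≠ [] → p.length < L →
      P.getD ((L : Int), p) 0
        = (words.countP (fun w => decide (w.toList.length = L ∧ p <+: w.toList)) : Int) := by
    intro L p hp hpl
    rw [hPdef, pvGetD_incfold2 words (fun w => pvPrefKeys w.toList), PySem.Dict.getD_empty]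
    have hterm : words.map (fun w => (((pvPrefKeys w.toList).count ((L : Int), p) : Nat) : Int))
        = words.map (fun w =>
            if (fun w : String => decide (w.toList.length = L ∧ p <+: w.toList)) w = true
            then (1 : Int) else 0) := by
      apply List.map_congr_left
      intro w _
      rw [pvCount_prefKeys _ _ _ hp hpl]
      by_cases h : (w.toList.length = L ∧ p <+: w.toList) <;> simp_all
    rw [hterm, PySem.List.sum_map_ite_one_zero]
    simp
  have hS : ∀ (L : Nat) (t : List Char), t ≠ [] → t.length < L →
      S.getD ((L : Int), t) 0
        = (words.countP (fun w => decide (w.toList.length = L ∧ t <:+ w.toList)) : Int) := by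
    intro L t ht htl
    rw [hSdef, pvGetD_incfold2 words (fun w => pvSufKeys w.toList), PySem.Dict.getD_empty]
    have hterm : words.map (fun w => (((pvSufKeys w.toList).count ((L : Int), t) : Nat) : Int))
        = words.map (fun w =>
            if (fun w : String => decide (w.toList.length = L ∧ t <:+ w.toList)) w = true
            then (1 : Int) else 0) := by
      apply List.map_congr_left
      intro w _
      rw [pvCount_sufKeys _ _ _ ht htl]
      by_cases h : (w.toList.length = L ∧ t <:+ w.toList) <;> simp_all
    rw [hterm, PySem.List.sum_map_ite_one_zero]
    simp
  clear hTdef hRdef hTOdef hPdef hSdef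
  -- pointwise equality of the two per-query loop bodies
  refine pvFoldl_congr _ _ ?_ queries []
  intro acc q
  set cs := q.toList with hcsdef
  have hTq := hT cs.length
  have hRq := hR cs.length
  rw [hTO cs.length]
  set cntL := words.countP (fun w => decide (w.toList.length = cs.length)) with hcntLdef
  have hcnt : (words.map (fun w => w.toList)).countP (fun v => decide (v.length = cs.length))
      = cntL := by rw [List.countP_map]; rfl
  have hcntR : (words.map (fun w => w.toList.reverse)).countP
        (fun v => decide (v.length = cs.length)) = cntL := by
    rw [List.countP_map, hcntLdef]
    apply List.countP_congr
    intro w _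
    simp
  cases hTg : T.get? (PySem.Int.toStr (cs.length : Int)) with
  | none =>
    rw [hTg] at hTq
    simp only at hTq
    rw [hcnt] at hTq
    simp only []
    rw [if_pos (show (cntL : Int) = 0 from by exact_mod_cast hTq)]
  | some root =>
    rw [hTg] at hTq
    simp only at hTq
    rw [hcnt] at hTq
    obtain ⟨hgood, hne⟩ := hTq
    simp only []
    rw [if_neg (show ¬ ((cntL : Int) = 0) from by exact_mod_cast hne)]
    by_cases hrep : cs = List.replicate cs.length '?'
    · have hroot : root.count = (cntL : Int) := by
        rw [hgood.1, ← hcnt, List.countP_eq_length_filter]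
      rw [if_pos hrep, if_pos hrep, hroot]
    · rw [if_neg hrep, if_neg hrep]
      have hcs0 : cs ≠ [] := by
        intro h
        exact hrep (by rw [h]; simp)
      have hws : ((words.map (fun w => w.toList)).filter
            (fun v => decide (v.length = cs.length))).length = cntL := by
        rw [← hcnt, List.countP_eq_length_filter]
      by_cases hq0 : PySem.List.pyGet? cs 0 = some '?'
      · -- query[0] == '?': the reverse-trie branch
        rw [if_pos hq0]
        have hin : '?' ∈ cs := by
          cases hcse : cs with
          | nil => exact absurd hcse hcs0
          | cons c0 cs'' =>
            rw [hcse] at hq0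
            simp [PySem.List.pyGet?, PySem.List.pyIdx?] at hq0
            rw [hq0]
            simp
        have hinr : '?' ∈ cs.reverse := by simpa using hin
        obtain ⟨k', hk'⟩ := Option.isSome_iff_exists.mp
          ((PySem.List.index?_isSome_iff cs.reverse '?').mpr hinr)
        obtain ⟨a', b', hsplit', hlen', hnot'⟩ :=
          (PySem.List.index?_eq_some_iff cs.reverse '?' k').mp hk'
        have hcsrev : cs = (b'.reverse ++ ['?']) ++ a'.reverse := by
          rw [← List.reverse_reverse cs, hsplit']
          simp
        have hLsum : cs.length = k' + 1 + b'.length := by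
          have := congrArg List.length hsplit'
          simp at this
          omega
        cases hRg : R.get? (PySem.Int.toStr (cs.length : Int)) with
        | none =>
          exfalso
          rw [hRg] at hRq
          simp only at hRq
          rw [hcntR] at hRq
          exact hne hRq
        | some rroot =>
          rw [hRg] at hRq
          simp only at hRq
          rw [hcntR] at hRq
          obtain ⟨hgoodR, _⟩ := hRq
          simp only []
          conv_lhs => rw [hsplit']
          rw [pvScan_q a' rroot b' hnot']
          -- B side: the third and fourth conditions
          rw [if_neg (show ¬ (PySem.Chars.isIn ['?'] cs = false) from by
              simp [(pvIsIn_singleton '?' cs).mpr hin]),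
            if_neg (show ¬ ¬ (PySem.List.pyGet? cs 0 = some '?') from not_not_intro hq0), hk']
          simp only [Option.getD_some]
          by_cases ha' : a' = []
          · -- query ends with '?': full count for this length
            subst ha'
            have hk0 : k' = 0 := by simpa using hlen'.symm
            subst hk0
            rw [show ((cs.length : Int) - ((0 : Nat) : Int)) = ((cs.length : Nat) : Int) by simp]
            rw [PySem.List.slice_from cs (by positivity)]
            simp only [Int.toNat_natCast, List.drop_length]
            simp only [if_true]
            have hroot : rroot.count = (cntL : Int) := by
              rw [hgoodR.1, ← hcntR, List.countP_eq_length_filter]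
            rw [pvCnt_nil, hroot]
          · -- fixed suffix after the last '?'
            have hlena' : 0 < a'.length := List.length_pos_of_ne_nil ha'
            have htail : PySem.List.slice cs (some ((cs.length : Int) - (k' : Int))) none
                = a'.reverse := by
              rw [PySem.List.slice_from cs (by omega)]
              rw [show ((cs.length : Int) - (k' : Int)).toNat = (b'.reverse ++ ['?']).length by
                simp; omega]
              rw [hcsrev, List.drop_left]
            rw [htail]
            rw [if_neg (show ¬ (a'.reverse = ([] : List Char)) from by simp [ha'])]
            rw [hS cs.length a'.reverse (by simp [ha']) (by simp; omega)]
            rw [hgoodR.2.1 a' ha' (by omega), pvWsR_countP]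
      · -- query[0] != '?': the forward-trie branch
        rw [if_neg hq0]
        by_cases hin : '?' ∈ cs
        · -- scan stops at the first '?'
          obtain ⟨k, hk⟩ := Option.isSome_iff_exists.mp
            ((PySem.List.index?_isSome_iff cs '?').mpr hin)
          obtain ⟨a, b, hsplit, hlen, hnot⟩ :=
            (PySem.List.index?_eq_some_iff cs '?' k).mp hk
          have ha : a ≠ [] := by
            intro h
            apply hq0
            rw [hsplit, h]
            simp [PySem.List.pyGet?, PySem.List.pyIdx?]
          have hLsum : cs.length = k + 1 + b.length := by
            have := congrArg List.length hsplit
            simp at this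
            omega
          rw [if_neg (show ¬ (PySem.Chars.isIn ['?'] cs = false) from by
              simp [(pvIsIn_singleton '?' cs).mpr hin]),
            if_pos (show ¬ (PySem.List.pyGet? cs 0 = some '?') from hq0), hk]
          simp only [Option.getD_some]
          have hkey : PySem.List.slice cs none (some ((k : Nat) : Int)) = a := by
            rw [PySem.List.slice_to cs (by positivity)]
            simp only [Int.toNat_natCast]
            rw [hsplit, ← hlen, List.take_left]
          rw [hkey]
          conv_lhs => rw [hsplit]
          rw [pvScan_q a root b hnot]
          rw [hP cs.length a ha (by omega)]
          rw [hgood.2.1 a ha (by omega), pvWs_countP]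
        · -- no '?' at all: both sides give 0
          rw [if_pos (show PySem.Chars.isIn ['?'] cs = false from by
            cases h : PySem.Chars.isIn ['?'] cs
            · rfl
            · exact absurd ((pvIsIn_singleton '?' cs).mp h) hin)]
          rw [pvScan_no_q cs root hcs0 hin hgood.2.2]

-- ===== VERDICT (by name: the statement is the Claim_ definition above) =====
theorem solution_spec : Claim_equal_solution := by
  intro words queries _
  unfold Spec_solution
  exact pvMain words queries
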